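-- pv_equiv track=rewrite | github.com/sleticalboy/dailearn | pytest/src/etools/algo_generate_module.py | _typeof_jni
-- ===== SOURCE A (Python) =====
-- types_map = {
--     'int': 'jint I',
--     'XYAIImageFormat': 'jint I',
--     'XYInt32': 'jint I int',
--     'float': 'jfloat F',
--     'XYFloat': 'jfloat F',
--     'XYDouble': 'jdouble D',
--     'XYHandle': 'jlong J',
--     'XYLong': 'jlong J',
--     'XYBool': 'jboolean Z',
--     'XYChar': 'jchar C',
--     'XYShort': 'jshort S',
--     'void': 'void V',
--     'XYVoid': 'void V',
--     # 这个比较特殊，就单独放这了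
--     'XYChar*': 'jstring Ljava/lang/String;',
--     'XYString': 'jstring Ljava/lang/String;',
--     'std::string': 'jstring Ljava/lang/String;',
--     # 作为数组类型
--     'std::vector': 'jobject [',
--     'XYAIFrameInfo': 'jobject Lcom/quvideo/mobile/component/common/AIFrameInfo;',
--     'XYAIRect': 'jobject Lcom/quvideo/mobile/component/common/AIRect;',
--     'XYAIRectf': 'jobject Lcom/quvideo/mobile/component/common/AIRectF;',
--     'XYAIPoint': 'jobject Lcom/quvideo/mobile/component/common/AIPoint;',
--     'XYAIPointf': 'jobject Lcom/quvideo/mobile/component/common/AIPointF;',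
--     'InitResult': 'jobject Lcom/quvideo/mobile/component/common/AIInitResult;',
--     # c 中定义的枚举和结构体在这里根据代码动态添加
-- }
--
-- def _typeof_jni(pt: str, allow_missed: bool = False) -> str:
--     """
--     获取 jni 数据类型
--     @param pt:
--     @return:
--     """
--     if 'std::vector' in pt:
--         left = pt.find('<')
--         right = pt.find('>')
--         raw_type = pt[left + 1: right]
--         tj = _typeof_jni(raw_type, allow_missed)
--         return tj + 'Array' if tj != '' else tj
--     try:
--         ctype = types_map[pt if pt in types_map else pt.replace('*', '')].split()[0]
--         return ctype + 'Array' if '**' in pt else ctype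
--     except KeyError as e:
--         if allow_missed and pt not in types_map:
--             return ''
--         raise e
-- ===== SOURCE B (Python) =====
-- types_map = {
--     'int': 'jint I',
--     'XYAIImageFormat': 'jint I',
--     'XYInt32': 'jint I int',
--     'float': 'jfloat F',
--     'XYFloat': 'jfloat F',
--     'XYDouble': 'jdouble D',
--     'XYHandle': 'jlong J',
--     'XYLong': 'jlong J',
--     'XYBool': 'jboolean Z',
--     'XYChar': 'jchar C',
--     'XYShort': 'jshort S',
--     'void': 'void V',
--     'XYVoid': 'void V',
--     'XYChar*': 'jstring Ljava/lang/String;',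
--     'XYString': 'jstring Ljava/lang/String;',
--     'std::string': 'jstring Ljava/lang/String;',
--     'std::vector': 'jobject [',
--     'XYAIFrameInfo': 'jobject Lcom/quvideo/mobile/component/common/AIFrameInfo;',
--     'XYAIRect': 'jobject Lcom/quvideo/mobile/component/common/AIRect;',
--     'XYAIRectf': 'jobject Lcom/quvideo/mobile/component/common/AIRectF;',
--     'XYAIPoint': 'jobject Lcom/quvideo/mobile/component/common/AIPoint;',
--     'XYAIPointf': 'jobject Lcom/quvideo/mobile/component/common/AIPointF;',
--     'InitResult': 'jobject Lcom/quvideo/mobile/component/common/AIInitResult;',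
-- }
--
--
-- def _typeof_jni(pt: str, allow_missed: bool = False) -> str:
--     # iterative: peel every vector layer first, counting depth, then one dict lookup and one repeated suffix
--     depth = 0
--     while 'std::vector' in pt:
--         pt = pt[pt.find('<') + 1: pt.find('>')]
--         depth += 1
--     key = pt if pt in types_map else pt.replace('*', '')
--     if key not in types_map:
--         if allow_missed:
--             return ''
--         raise KeyError(key)
--     ctype = types_map[key].split()[0]
--     if '**' in pt:
--         ctype += 'Array'
--     return ctype + 'Array' * depth
-- ===== Notes on version B (the rewrite author's own statement) =====
-- stated objective: simpler
-- what changed: Replaces A's per-layer recursion (which appends the array suffix and re-tests emptiness at every level) with a single while-loop that peels all vector layers counting depth, then one dict lookup and one suffix repeated depth times.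
import Mathlib
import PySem

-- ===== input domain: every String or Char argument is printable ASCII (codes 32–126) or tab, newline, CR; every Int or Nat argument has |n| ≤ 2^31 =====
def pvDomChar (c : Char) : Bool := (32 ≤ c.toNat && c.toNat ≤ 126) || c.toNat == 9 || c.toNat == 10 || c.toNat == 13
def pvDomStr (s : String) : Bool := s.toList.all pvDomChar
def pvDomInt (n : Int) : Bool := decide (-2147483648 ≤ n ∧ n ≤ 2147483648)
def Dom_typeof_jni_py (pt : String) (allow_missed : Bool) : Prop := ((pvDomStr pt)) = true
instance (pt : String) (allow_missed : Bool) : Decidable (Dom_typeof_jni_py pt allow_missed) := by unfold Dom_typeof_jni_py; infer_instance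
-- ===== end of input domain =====

-- B replaces A's per-layer recursion by an explicit unwrap loop that counts vector depth,
-- then one dict lookup and one repeated-suffix append (objective: simpler decomposition).

-- the module-level types_map (shared context of both Pythons)
def pvTypesMap : PySem.Dict (List Char) (List Char) := PySem.Dict.mk [
  ("int".toList, "jint I".toList),
  ("XYAIImageFormat".toList, "jint I".toList),
  ("XYInt32".toList, "jint I int".toList),
  ("float".toList, "jfloat F".toList),
  ("XYFloat".toList, "jfloat F".toList),
  ("XYDouble".toList, "jdouble D".toList),
  ("XYHandle".toList, "jlong J".toList),
  ("XYLong".toList, "jlong J".toList),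
  ("XYBool".toList, "jboolean Z".toList),
  ("XYChar".toList, "jchar C".toList),
  ("XYShort".toList, "jshort S".toList),
  ("void".toList, "void V".toList),
  ("XYVoid".toList, "void V".toList),
  ("XYChar*".toList, "jstring Ljava/lang/String;".toList),
  ("XYString".toList, "jstring Ljava/lang/String;".toList),
  ("std::string".toList, "jstring Ljava/lang/String;".toList),
  ("std::vector".toList, "jobject [".toList),
  ("XYAIFrameInfo".toList, "jobject Lcom/quvideo/mobile/component/common/AIFrameInfo;".toList),
  ("XYAIRect".toList, "jobject Lcom/quvideo/mobile/component/common/AIRect;".toList),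
  ("XYAIRectf".toList, "jobject Lcom/quvideo/mobile/component/common/AIRectF;".toList),
  ("XYAIPoint".toList, "jobject Lcom/quvideo/mobile/component/common/AIPoint;".toList),
  ("XYAIPointf".toList, "jobject Lcom/quvideo/mobile/component/common/AIPointF;".toList),
  ("InitResult".toList, "jobject Lcom/quvideo/mobile/component/common/AIInitResult;".toList)]

-- ===== PORT A =====
-- A's recursion; fuel = length+1 is only a totality guard (each vector layer strictly shrinks pt)
def pvCoreA (fuel : Nat) (pt : List Char) (allow_missed : Bool) : List Char :=
  match fuel with
  | 0 => []  -- never reached when fuel > pt.length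
  | fuel + 1 =>
    if PySem.Chars.isIn "std::vector".toList pt then
      let left := PySem.Chars.find pt "<".toList
      let right := PySem.Chars.find pt ">".toList
      let raw_type := PySem.List.slice pt (some (left + 1)) (some right)
      let tj := pvCoreA fuel raw_type allow_missed
      if tj ≠ [] then tj ++ "Array".toList else tj
    else
      match pvTypesMap.get? (if pvTypesMap.contains pt then pt else PySem.Chars.replace pt "*".toList []) with
      | some v =>
        let ctype := (PySem.Chars.split₀ v).headD []  -- .split()[0]; every types_map value is non-blank, so [0] never raises
        if PySem.Chars.isIn "**".toList pt then ctype ++ "Array".toList else ctype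
      | none => []  -- Python: '' if allow_missed, else KeyError is raised (excluded by Pre_)

def typeof_jni_py (pt : String) (allow_missed : Bool) : String :=
  String.mk (pvCoreA (pt.toList.length + 1) pt.toList allow_missed)

-- ===== PORT B =====
-- B's while-loop; fuel = length+1 is only a totality guard (each iteration strictly shrinks pt)
def pvUnwrapB (fuel : Nat) (pt : List Char) (depth : Nat) : List Char × Nat :=
  match fuel with
  | 0 => (pt, depth)  -- never reached when fuel > pt.length
  | fuel + 1 =>
    if PySem.Chars.isIn "std::vector".toList pt then
      pvUnwrapB fuel
        (PySem.List.slice pt (some (PySem.Chars.find pt "<".toList + 1)) (some (PySem.Chars.find pt ">".toList)))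
        (depth + 1)
    else (pt, depth)

def typeof_jni_py_alt (pt : String) (allow_missed : Bool) : String :=
  let pd := pvUnwrapB (pt.toList.length + 1) pt.toList 0
  String.mk
    (match pvTypesMap.get? (if pvTypesMap.contains pd.1 then pd.1 else PySem.Chars.replace pd.1 "*".toList []) with
     | none => []  -- Python: '' if allow_missed, else KeyError is raised (excluded by Pre_)
     | some v =>
       (if PySem.Chars.isIn "**".toList pd.1
        then (PySem.Chars.split₀ v).headD [] ++ "Array".toList
        else (PySem.Chars.split₀ v).headD []) ++ (List.replicate pd.2 "Array".toList).flatten)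

-- ===== PRECONDITION & SPEC =====
-- innermost element type, for Pre_ only (peels the vector layers the way the Python slicing does)
def pvElem (fuel : Nat) (cs : List Char) : List Char :=
  match fuel with
  | 0 => cs
  | fuel + 1 =>
    if PySem.Chars.isIn "std::vector".toList cs then
      pvElem fuel
        (PySem.List.slice cs (some (PySem.Chars.find cs "<".toList + 1)) (some (PySem.Chars.find cs ">".toList)))
    else cs

-- A raises KeyError exactly when allow_missed is False and the innermost vector element type
-- (itself and with '*' removed) is not a key of types_map; Pre_ excludes exactly those inputs.
def Pre_typeof_jni_py (pt : String) (allow_missed : Bool) : Prop :=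
  allow_missed = true ∨
    (pvTypesMap.contains (pvElem (pt.toList.length + 1) pt.toList) = true ∨
     pvTypesMap.contains (PySem.Chars.replace (pvElem (pt.toList.length + 1) pt.toList) "*".toList []) = true)
instance (pt : String) (allow_missed : Bool) : Decidable (Pre_typeof_jni_py pt allow_missed) := by
  unfold Pre_typeof_jni_py; infer_instance

def pvWitness_typeof_jni_py : String × Bool := ("std::vector<int>", false)

def Spec_typeof_jni_py (pt : String) (allow_missed : Bool) (out : String) : Prop := out = typeof_jni_py_alt pt allow_missed
instance (pt : String) (allow_missed : Bool) (out : String) : Decidable (Spec_typeof_jni_py pt allow_missed out) := by unfold Spec_typeof_jni_py; infer_instance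

-- ===== CLAIM (what is proved, stated in full; the proofs are below) =====
def Claim_equal_typeof_jni_py : Prop := ∀ (pt : String) (allow_missed : Bool), Dom_typeof_jni_py pt allow_missed → Pre_typeof_jni_py pt allow_missed → Spec_typeof_jni_py pt allow_missed (typeof_jni_py pt allow_missed)

-- ===== LEMMAS AND PROOFS =====

-- what B computes after its loop, as a function of the peeled string and the depth
def pvFinish (p : List Char) (d : Nat) : List Char :=
  match pvTypesMap.get? (if pvTypesMap.contains p then p else PySem.Chars.replace p "*".toList []) with
  | none => []
  | some v =>
    (if PySem.Chars.isIn "**".toList p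
     then (PySem.Chars.split₀ v).headD [] ++ "Array".toList
     else (PySem.Chars.split₀ v).headD []) ++ (List.replicate d "Array".toList).flatten

lemma pvClampIdx_of_nonneg (n : Nat) (i : Int) (hi : 0 ≤ i) :
    PySem.List.clampIdx n i = min i.toNat n := by
  have h := PySem.List.clampIdx_natCast n i.toNat
  rwa [Int.toNat_of_nonneg hi] at h

lemma pvSliceLt (pt : List Char) (h : PySem.Chars.isIn "std::vector".toList pt = true) :
    (PySem.List.slice pt (some (PySem.Chars.find pt "<".toList + 1))
      (some (PySem.Chars.find pt ">".toList))).length < pt.length := by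
  have hinf : "std::vector".toList <:+: pt := (PySem.Chars.isIn_iff_infix _ _).mp h
  have h11 : 11 ≤ pt.length := by simpa using hinf.length_le
  rw [PySem.List.length_slice]
  have hLlb := PySem.Chars.neg_one_le_find pt "<".toList
  have hRlb := PySem.Chars.neg_one_le_find pt ">".toList
  have hcR := PySem.List.clampIdx_le pt.length (PySem.Chars.find pt ">".toList)
  rcases lt_or_ge (PySem.Chars.find pt "<".toList) 0 with hLneg | hLpos
  ·  have hL0 : PySem.Chars.find pt "<".toList = -1 := by omega
     have e1 : PySem.List.clampIdx pt.length (PySem.Chars.find pt "<".toList + 1) = 0 := by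
       rw [hL0]
       norm_num [pvClampIdx_of_nonneg]
     rw [e1]
     rcases lt_or_ge (PySem.Chars.find pt ">".toList) 0 with hRneg | hRpos
     ·  have hR0 : PySem.Chars.find pt ">".toList = -1 := by omega
        rw [hR0, PySem.List.clampIdx_neg_one]
        omega
     ·  have hspec := (PySem.Chars.find_spec (s := pt) (sub := ">".toList) hRpos).1
        have hdrop : 1 ≤ (pt.drop (PySem.Chars.find pt ">".toList).toNat).length := by
          simpa using hspec.length_le
        have hRn : (PySem.Chars.find pt ">".toList).toNat < pt.length := by
          simp only [List.length_drop] at hdrop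
          omega
        rw [pvClampIdx_of_nonneg _ _ hRpos]
        omega
  ·  have e2 : 1 ≤ PySem.List.clampIdx pt.length (PySem.Chars.find pt "<".toList + 1) := by
       rw [pvClampIdx_of_nonneg _ _ (by omega)]
       omega
     omega

lemma pvRep_succ (d : Nat) (x : List Char) :
    (List.replicate (d + 1) x).flatten = (List.replicate d x).flatten ++ x := by
  rw [List.replicate_succ', List.flatten_append]; simp

lemma pvCtype_ne (k v : List Char) (h : pvTypesMap.get? k = some v) :
    (PySem.Chars.split₀ v).headD [] ≠ [] := by
  have hm : (k, v) ∈ pvTypesMap.items := PySem.Dict.mem_items_of_get?_eq_some pvTypesMap h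
  have hall : ∀ p ∈ pvTypesMap.items, (PySem.Chars.split₀ p.2).headD [] ≠ [] := by decide
  exact hall (k, v) hm

lemma pvUnwrap_acc (fuel : Nat) : ∀ (pt : List Char) (d : Nat),
    pvUnwrapB fuel pt d = ((pvUnwrapB fuel pt 0).1, (pvUnwrapB fuel pt 0).2 + d) := by
  induction fuel with
  | zero => intro pt d; simp [pvUnwrapB]
  | succ f ih =>
    intro pt d
    by_cases h : PySem.Chars.isIn "std::vector".toList pt = true
    · simp only [pvUnwrapB, if_pos h]
      rw [ih _ (d + 1), ih _ (0 + 1)]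
      simp
      omega
    · simp only [pvUnwrapB, if_neg h]
      simp

lemma pvFinish_eq_none (p : List Char) (d : Nat)
    (hg : pvTypesMap.get? (if pvTypesMap.contains p then p
      else PySem.Chars.replace p "*".toList []) = none) : pvFinish p d = [] := by
  unfold pvFinish; rw [hg]

lemma pvFinish_eq_some (p : List Char) (d : Nat) (v : List Char)
    (hg : pvTypesMap.get? (if pvTypesMap.contains p then p
      else PySem.Chars.replace p "*".toList []) = some v) :
    pvFinish p d = (if PySem.Chars.isIn "**".toList p
      then (PySem.Chars.split₀ v).headD [] ++ "Array".toList
      else (PySem.Chars.split₀ v).headD []) ++ (List.replicate d "Array".toList).flatten := by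
  unfold pvFinish; rw [hg]

lemma pvMain (fuel : Nat) : ∀ (pt : List Char) (am : Bool), pt.length < fuel →
    pvCoreA fuel pt am = pvFinish (pvUnwrapB fuel pt 0).1 (pvUnwrapB fuel pt 0).2 := by
  induction fuel with
  | zero => intro pt am h; omega
  | succ f ih =>
    intro pt am h
    by_cases hv : PySem.Chars.isIn "std::vector".toList pt = true
    · have hlt := pvSliceLt pt hv
      have hU : pvUnwrapB (f + 1) pt 0 =
          ((pvUnwrapB f (PySem.List.slice pt (some (PySem.Chars.find pt "<".toList + 1))
              (some (PySem.Chars.find pt ">".toList))) 0).1,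
           (pvUnwrapB f (PySem.List.slice pt (some (PySem.Chars.find pt "<".toList + 1))
              (some (PySem.Chars.find pt ">".toList))) 0).2 + 1) := by
        simp only [pvUnwrapB, if_pos hv]
        rw [pvUnwrap_acc f _ (0 + 1)]
      have hA : pvCoreA (f + 1) pt am =
          (if pvCoreA f (PySem.List.slice pt (some (PySem.Chars.find pt "<".toList + 1))
              (some (PySem.Chars.find pt ">".toList))) am ≠ []
           then pvCoreA f (PySem.List.slice pt (some (PySem.Chars.find pt "<".toList + 1))
              (some (PySem.Chars.find pt ">".toList))) am ++ "Array".toList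
           else pvCoreA f (PySem.List.slice pt (some (PySem.Chars.find pt "<".toList + 1))
              (some (PySem.Chars.find pt ">".toList))) am) := by
        simp only [pvCoreA, if_pos hv]
      rw [hA, ih _ am (by omega), hU]
      rcases hX : pvUnwrapB f (PySem.List.slice pt (some (PySem.Chars.find pt "<".toList + 1))
        (some (PySem.Chars.find pt ">".toList))) 0 with ⟨p, k⟩
      dsimp only
      cases hg : pvTypesMap.get? (if pvTypesMap.contains p then p
          else PySem.Chars.replace p "*".toList []) with
      | none => rw [pvFinish_eq_none p k hg, pvFinish_eq_none p (k + 1) hg]; simp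
      | some v =>
        rw [pvFinish_eq_some p k v hg, pvFinish_eq_some p (k + 1) v hg]
        have hne := pvCtype_ne _ v hg
        set b := (if PySem.Chars.isIn "**".toList p
            then (PySem.Chars.split₀ v).headD [] ++ "Array".toList
            else (PySem.Chars.split₀ v).headD []) with hb
        have hbase : b ≠ [] := by
          rw [hb]; split_ifs <;> simp_all
        rw [if_pos (show b ++ (List.replicate k "Array".toList).flatten ≠ [] by
          simp [List.append_eq_nil_iff, hbase])]
        rw [pvRep_succ, ← List.append_assoc]
    · have hU : pvUnwrapB (f + 1) pt 0 = (pt, 0) := by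
        simp only [pvUnwrapB, if_neg hv]
      rw [hU]
      dsimp only
      simp only [pvCoreA, if_neg hv]
      cases hg : pvTypesMap.get? (if pvTypesMap.contains pt then pt
          else PySem.Chars.replace pt "*".toList []) with
      | none => rw [pvFinish_eq_none _ _ hg]
      | some v => rw [pvFinish_eq_some _ _ _ hg]; simp

-- ===== VERDICT (by name: the statement is the Claim_ definition above) =====
theorem typeof_jni_py_spec : Claim_equal_typeof_jni_py := by
  intro pt am _ _
  unfold Spec_typeof_jni_py typeof_jni_py typeof_jni_py_alt
  exact congrArg String.mk (pvMain _ pt.toList am (by omega))
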